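-- pv_equiv track=rewrite | github.com/brainyvoyage/deleet | python/geeks/hashing/perm_rows.py | find_permuted_rows
-- ===== SOURCE A (Python) =====
-- def find_permuted_rows(mat, row):
--     num_rows = len(mat)
--     assert (row < num_rows)
--
--     hashed_row = set(mat[row])
--     result = []
--     for r in range(num_rows):
--         if r == row:
--             continue
--         c = set(mat[r])
--         if c == hashed_row:
--             result.append(r)
--     return result
-- ===== SOURCE B (Python) =====
-- def find_permuted_rows(mat, row):
--     num_rows = len(mat)
--     assert (row < num_rows)
--     buckets = {}
--     for r, vals in enumerate(mat):
--         buckets.setdefault(tuple(sorted(set(vals))), []).append(r)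
--     key = tuple(sorted(set(mat[row])))
--     return [r for r in buckets[key] if r != row]
-- ===== Notes on version B (the rewrite author's own statement) =====
-- stated objective: alternative
-- what changed: Instead of re-hashing and comparing every row's element-set against the query row in a scan, B groups all rows by a canonical key (sorted distinct elements) into a dict in one pass and returns the query key's bucket with the query index removed.
import Mathlib
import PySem

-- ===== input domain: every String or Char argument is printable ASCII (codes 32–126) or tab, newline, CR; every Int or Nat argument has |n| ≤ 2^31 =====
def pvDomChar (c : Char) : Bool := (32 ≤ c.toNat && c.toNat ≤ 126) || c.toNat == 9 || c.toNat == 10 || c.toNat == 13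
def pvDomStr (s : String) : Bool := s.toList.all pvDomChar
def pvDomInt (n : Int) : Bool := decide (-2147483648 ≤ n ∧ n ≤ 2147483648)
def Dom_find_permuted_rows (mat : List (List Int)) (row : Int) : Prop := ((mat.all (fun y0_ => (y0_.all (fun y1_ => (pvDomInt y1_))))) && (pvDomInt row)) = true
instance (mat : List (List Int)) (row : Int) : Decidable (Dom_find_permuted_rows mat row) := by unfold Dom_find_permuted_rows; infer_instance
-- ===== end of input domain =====

-- B groups all rows by a canonical key (sorted distinct elements) into a dict in one
-- pass and returns the query key's bucket with the query index removed; same result,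
-- different decomposition (no per-query scan comparing sets).

-- ===== PORT A =====
def find_permuted_rows (mat : List (List Int)) (row : Int) : List Int :=
  let num_rows : Int := PySem.List.len mat
  let hashed_row : PySem.Set Int := PySem.Set.ofList (PySem.List.pyGetD mat row [])
  (PySem.List.pyRange 0 num_rows 1).foldl
    (fun result r =>
      if r == row then result
      else
        let c : PySem.Set Int := PySem.Set.ofList (PySem.List.pyGetD mat r [])
        if PySem.Set.equal c hashed_row then result ++ [r] else result)
    []

-- ===== PORT B =====
-- tuple(sorted(set(vals))) : the canonical bucket key
def pvCanon (vals : List Int) : List Int :=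
  PySem.List.sorted (PySem.Set.ofList vals) (fun x => x) false

def find_permuted_rows_alt (mat : List (List Int)) (row : Int) : List Int :=
  let buckets : PySem.Dict (List Int) (List Int) :=
    (PySem.List.enumerate mat 0).foldl
      (fun d p => d.modify (pvCanon p.2) [] (· ++ [p.1])) PySem.Dict.empty
  let key : List Int := pvCanon (PySem.List.pyGetD mat row [])
  (buckets.getD key []).filter (fun r => !(r == row))

-- ===== PRECONDITION & SPEC =====
-- Pre_ excludes exactly the inputs where A raises: row ≥ len(mat) fails the assert,
-- row < -len(mat) raises IndexError on mat[row].
def Pre_find_permuted_rows (mat : List (List Int)) (row : Int) : Prop :=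
  -(mat.length : Int) ≤ row ∧ row < (mat.length : Int)
instance (mat : List (List Int)) (row : Int) : Decidable (Pre_find_permuted_rows mat row) := by
  unfold Pre_find_permuted_rows; infer_instance

def pvWitness_find_permuted_rows : List (List Int) × Int := ([[1, 2], [2, 1, 1], [3]], 0)

def Spec_find_permuted_rows (mat : List (List Int)) (row : Int) (out : List Int) : Prop := out = find_permuted_rows_alt mat row
instance (mat : List (List Int)) (row : Int) (out : List Int) : Decidable (Spec_find_permuted_rows mat row out) := by unfold Spec_find_permuted_rows; infer_instance

-- ===== CLAIM (what is proved, stated in full; the proofs are below) =====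
def Claim_equal_find_permuted_rows : Prop := ∀ (mat : List (List Int)) (row : Int), Dom_find_permuted_rows mat row → Pre_find_permuted_rows mat row → Spec_find_permuted_rows mat row (find_permuted_rows mat row)

-- ===== LEMMAS AND PROOFS =====

-- set(a) == set(b) in Python iff the canonical keys coincide
lemma pvCanon_eq_iff (a b : List Int) :
    (pvCanon a = pvCanon b) ↔ PySem.Set.equal (PySem.Set.ofList a) (PySem.Set.ofList b) = true := by
  unfold pvCanon
  rw [PySem.List.sorted_id_eq_sorted_id_iff_perm, PySem.Set.equal_iff,
    List.perm_ext_iff_of_nodup (PySem.Set.nodup_ofList a) (PySem.Set.nodup_ofList b)]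

-- A's accumulator loop, characterised as a filter
lemma pvA_eq (mat : List (List Int)) (row : Int) :
    find_permuted_rows mat row =
      (PySem.List.pyRange 0 (mat.length : Int) 1).filter
        (fun r => !(r == row) &&
          PySem.Set.equal (PySem.Set.ofList (PySem.List.pyGetD mat r []))
            (PySem.Set.ofList (PySem.List.pyGetD mat row []))) := by
  unfold find_permuted_rows
  simp only [PySem.List.len_eq]
  rw [show (fun (result : List Int) (r : Int) =>
      if r == row then result
      else
        if PySem.Set.equal (PySem.Set.ofList (PySem.List.pyGetD mat r []))
            (PySem.Set.ofList (PySem.List.pyGetD mat row [])) then result ++ [r] else result)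
    = (fun result r =>
      if (!(r == row) &&
          PySem.Set.equal (PySem.Set.ofList (PySem.List.pyGetD mat r []))
            (PySem.Set.ofList (PySem.List.pyGetD mat row []))) = true
      then result ++ [r] else result) from by
        funext result r
        generalize (PySem.Set.ofList (PySem.List.pyGetD mat r [])).equal
          (PySem.Set.ofList (PySem.List.pyGetD mat row [])) = q
        by_cases hb : r = row
        · simp [hb]
        · simp [hb]]
  rw [PySem.List.foldl_append_if
    (p := fun r => !(r == row) &&
      PySem.Set.equal (PySem.Set.ofList (PySem.List.pyGetD mat r []))
        (PySem.Set.ofList (PySem.List.pyGetD mat row [])))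
    (f := fun r => r)]
  simp

-- the grouping loop of B: what any bucket of the dict holds
lemma pvBucket (l : List (Int × List Int)) (d : PySem.Dict (List Int) (List Int)) (c : List Int) :
    (l.foldl (fun d p => d.modify (pvCanon p.2) [] (· ++ [p.1])) d).getD c [] =
      d.getD c [] ++ (l.filter (fun p => pvCanon p.2 == c)).map (·.1) := by
  induction l generalizing d with
  | nil => simp
  | cons p t ih =>
    simp only [List.foldl_cons, ih, List.filter_cons]
    by_cases h : pvCanon p.2 = c
    · simp [h]
    · simp [h]
      rw [PySem.Dict.getD_modify, if_neg (fun hc => h hc.symm)]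

-- B's bucket lookup, characterised as a filter
lemma pvB_eq (mat : List (List Int)) (row : Int) :
    find_permuted_rows_alt mat row =
      (PySem.List.pyRange 0 (mat.length : Int) 1).filter
        (fun r => !(r == row) &&
          (pvCanon (PySem.List.pyGetD mat r []) ==
            pvCanon (PySem.List.pyGetD mat row []))) := by
  unfold find_permuted_rows_alt
  simp only [PySem.List.enumerate_eq_map_pyRange mat ([] : List Int)]
  rw [pvBucket]
  simp only [PySem.Dict.getD_empty, List.nil_append, List.filter_map, List.map_map,
    PySem.List.len_eq, List.filter_filter, Function.comp]
  rw [show ((fun (x : Int × List Int) => x.1) ∘ fun j => (j, PySem.List.pyGetD mat j []))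
      = (fun j => j) from rfl, List.map_id']

-- ===== VERDICT (by name: the statement is the Claim_ definition above) =====
theorem find_permuted_rows_spec : Claim_equal_find_permuted_rows := by
  intro mat row _ _
  unfold Spec_find_permuted_rows
  rw [pvA_eq, pvB_eq]
  apply List.filter_congr
  intro r _
  have h := pvCanon_eq_iff (PySem.List.pyGetD mat r []) (PySem.List.pyGetD mat row [])
  by_cases hr : r == row
  · simp [hr]
  · simp only [hr, Bool.not_false, Bool.true_and]
    by_cases hc : pvCanon (PySem.List.pyGetD mat r []) = pvCanon (PySem.List.pyGetD mat row [])
    · simp [hc, h.mp hc]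
    · have : PySem.Set.equal (PySem.Set.ofList (PySem.List.pyGetD mat r []))
          (PySem.Set.ofList (PySem.List.pyGetD mat row [])) ≠ true := fun he => hc (h.mpr he)
      simp [hc, this]
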